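-- pv_equiv track=rewrite | github.com/miles-lee90/closed-circle | scripts/build_site.py | sort_books_jp_first
-- ===== SOURCE A (Python) =====
-- def sort_books_jp_first(books: list[dict]) -> list[dict]:
--     priority = {"JP": 0, "KR": 1, "OTHER": 2}
--
--     def sort_key(b):
--         nat = b.get("nationality", "OTHER")
--         p = priority.get(nat, 2)
--         pub_date = b.get("pub_date", "0000-00-00")
--         return (p, [-ord(c) for c in pub_date])
--
--     return sorted(books, key=sort_key)
-- ===== SOURCE B (Python) =====
-- def sort_books_jp_first(books: list[dict]) -> list[dict]:
--     jp, kr, other = [], [], []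
--     buckets = {"JP": jp, "KR": kr}
--     for b in books:
--         buckets.get(b.get("nationality", "OTHER"), other).append(b)
--
--     def date_key(b):
--         return [-ord(c) for c in b.get("pub_date", "0000-00-00")]
--
--     return (sorted(jp, key=date_key)
--             + sorted(kr, key=date_key)
--             + sorted(other, key=date_key))
-- ===== Notes on version B (the rewrite author's own statement) =====
-- stated objective: alternative
-- what changed: replaces the single sort with a composite (priority, negated-date) key by a one-pass partition into JP/KR/other buckets, each bucket stably sorted by the date key alone and concatenated
import Mathlib
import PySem

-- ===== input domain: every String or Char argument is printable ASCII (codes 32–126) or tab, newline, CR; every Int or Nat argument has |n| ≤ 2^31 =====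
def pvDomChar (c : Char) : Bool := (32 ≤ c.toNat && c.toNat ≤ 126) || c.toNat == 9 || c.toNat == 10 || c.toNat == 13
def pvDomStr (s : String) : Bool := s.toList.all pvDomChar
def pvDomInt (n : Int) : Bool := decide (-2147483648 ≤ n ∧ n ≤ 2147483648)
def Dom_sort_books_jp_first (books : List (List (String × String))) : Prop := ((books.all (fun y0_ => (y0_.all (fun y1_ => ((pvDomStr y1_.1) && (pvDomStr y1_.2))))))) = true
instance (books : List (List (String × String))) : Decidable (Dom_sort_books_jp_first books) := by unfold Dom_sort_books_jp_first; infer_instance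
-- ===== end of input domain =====

-- B replaces the composite-key sort by a one-pass partition into JP/KR/other buckets,
-- each stably sorted by the date key alone, then concatenated (alternative decomposition, same cost).

-- ===== PORT A =====
-- pub_date key: [-ord(c) for c in b.get("pub_date", "0000-00-00")]
def pvDateKey (b : List (String × String)) : List Int :=
  ((PySem.Dict.mk b).getD "pub_date" "0000-00-00").toList.map (fun c => -(c.toNat : Int))

-- p = priority.get(b.get("nationality", "OTHER"), 2)
def pvPrio (b : List (String × String)) : Int :=
  (PySem.Dict.mk [("JP", (0 : Int)), ("KR", 1), ("OTHER", 2)]).getD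
    ((PySem.Dict.mk b).getD "nationality" "OTHER") 2

def sort_books_jp_first (books : List (List (String × String))) : List (List (String × String)) :=
  PySem.List.sorted2 books pvPrio pvDateKey

-- ===== PORT B =====
-- the one-pass partition loop: buckets.get(b.get("nationality","OTHER"), other).append(b)
def pvStep
    (acc : List (List (String × String)) × List (List (String × String)) × List (List (String × String)))
    (b : List (String × String)) :
    List (List (String × String)) × List (List (String × String)) × List (List (String × String)) :=
  let nat := (PySem.Dict.mk b).getD "nationality" "OTHER"
  if nat == "JP" then (acc.1 ++ [b], acc.2.1, acc.2.2)
  else if nat == "KR" then (acc.1, acc.2.1 ++ [b], acc.2.2)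
  else (acc.1, acc.2.1, acc.2.2 ++ [b])

def pvPartition (books : List (List (String × String))) :
    List (List (String × String)) × List (List (String × String)) × List (List (String × String)) :=
  books.foldl pvStep ([], [], [])

def sort_books_jp_first_alt (books : List (List (String × String))) : List (List (String × String)) :=
  let t := pvPartition books
  PySem.List.sorted t.1 pvDateKey ++ PySem.List.sorted t.2.1 pvDateKey
    ++ PySem.List.sorted t.2.2 pvDateKey

-- ===== PRECONDITION & SPEC =====
def Spec_sort_books_jp_first (books : List (List (String × String))) (out : List (List (String × String))) : Prop := out = sort_books_jp_first_alt books
instance (books : List (List (String × String))) (out : List (List (String × String))) : Decidable (Spec_sort_books_jp_first books out) := by unfold Spec_sort_books_jp_first; infer_instance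

-- ===== CLAIM (what is proved, stated in full; the proofs are below) =====
def Claim_equal_sort_books_jp_first : Prop := ∀ (books : List (List (String × String))), Dom_sort_books_jp_first books → Spec_sort_books_jp_first books (sort_books_jp_first books)

-- ===== LEMMAS AND PROOFS =====

theorem insertBy_append_all {α : Type} (before : α → α → Bool) (x : α) (l r : List α)
    (h : ∀ b ∈ r, before x b = true) :
    PySem.List.insertBy before x (l ++ r) = PySem.List.insertBy before x l ++ r := by
  induction l with
  | nil =>
    cases r with
    | nil => rfl
    | cons b r' => simp [PySem.List.insertBy, h b (by simp)]
  | cons a l' ih =>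
    simp only [List.cons_append, PySem.List.insertBy]
    by_cases hx : before x a = true <;> simp [hx, ih]

theorem insertBy_append_none {α : Type} (before : α → α → Bool) (x : α) (l r : List α)
    (h : ∀ b ∈ l, before x b = false) :
    PySem.List.insertBy before x (l ++ r) = l ++ PySem.List.insertBy before x r := by
  induction l with
  | nil => rfl
  | cons a l' ih =>
    have ha : before x a = false := h a (by simp)
    simp only [List.cons_append, PySem.List.insertBy, ha]
    simp [ih (fun b hb => h b (by simp [hb]))]

theorem insertBy_congr {α : Type} (before before' : α → α → Bool) (x : α) (l : List α)
    (h : ∀ b ∈ l, before x b = before' x b) :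
    PySem.List.insertBy before x l = PySem.List.insertBy before' x l := by
  induction l with
  | nil => rfl
  | cons a l' ih =>
    have ha := h a (by simp)
    simp only [PySem.List.insertBy, ha]
    by_cases hx : before' x a = true <;> simp [hx, ih (fun b hb => h b (by simp [hb]))]

-- sorted2 with the composite comparator is a fold of insertBy (definitional)
theorem sorted2_eq_foldl {α κ₂ : Type} [LT κ₂] [DecidableLT κ₂]
    (xs : List α) (k1 : α → Int) (k2 : α → κ₂) :
    PySem.List.sorted2 xs k1 k2 =
      xs.foldl (fun acc x => PySem.List.insertBy
        (fun a b => decide (k1 a < k1 b) || (!decide (k1 b < k1 a) && decide (k2 a < k2 b))) x acc) [] := rfl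

-- the central lemma: a stable sort by (k1, k2) with k1 ∈ {0,1,2} is the concatenation of
-- the three k1-buckets, each stably sorted by k2 alone
theorem sorted_append_singleton {α κ : Type} [LT κ] [DecidableLT κ]
    (l : List α) (x : α) (key : α → κ) :
    PySem.List.sorted (l ++ [x]) key =
      PySem.List.insertBy (fun a b => decide (key a < key b)) x (PySem.List.sorted l key) := by
  rw [PySem.List.sorted_eq_foldl_insertBy, PySem.List.sorted_eq_foldl_insertBy, List.foldl_append]
  rfl

theorem sorted2_append_singleton {α κ₂ : Type} [LT κ₂] [DecidableLT κ₂]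
    (l : List α) (x : α) (k1 : α → Int) (k2 : α → κ₂) :
    PySem.List.sorted2 (l ++ [x]) k1 k2 =
      PySem.List.insertBy
        (fun a b => decide (k1 a < k1 b) || (!decide (k1 b < k1 a) && decide (k2 a < k2 b))) x
        (PySem.List.sorted2 l k1 k2) := by
  rw [sorted2_eq_foldl, sorted2_eq_foldl, List.foldl_append]
  rfl

theorem sorted2_bucket {α κ₂ : Type} [LT κ₂] [DecidableLT κ₂]
    (k1 : α → Int) (k2 : α → κ₂) (h : ∀ x : α, k1 x = 0 ∨ k1 x = 1 ∨ k1 x = 2)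
    (xs : List α) :
    PySem.List.sorted2 xs k1 k2 =
      PySem.List.sorted (xs.filter (fun x => k1 x == 0)) k2
        ++ PySem.List.sorted (xs.filter (fun x => k1 x == 1)) k2
        ++ PySem.List.sorted (xs.filter (fun x => k1 x == 2)) k2 := by
  induction xs using List.reverseRecOn with
  | nil => rfl
  | append_singleton xs x ih =>
    have memS : ∀ (i : Int) b, b ∈ PySem.List.sorted (xs.filter (fun x => k1 x == i)) k2 → k1 b = i := by
      intro i b hb
      have := (PySem.List.mem_sorted _ _ _ _).1 hb
      have := (List.mem_filter.1 this).2
      simpa using this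
    rw [sorted2_append_singleton, ih, List.filter_append, List.filter_append, List.filter_append]
    rcases h x with h0 | h1 | h2
    · simp only [List.filter_cons, List.filter_nil, h0]
      norm_num
      rw [sorted_append_singleton,
        insertBy_append_all _ x _ _ (by
          intro b hb
          rcases List.mem_append.1 hb with hb | hb
          · have := memS 1 b hb; simp [h0, this]
          · have := memS 2 b hb; simp [h0, this]),
        insertBy_congr _ (fun a b => decide (k2 a < k2 b)) x _ (by
          intro b hb; have := memS 0 b hb; simp [h0, this])]
    · simp only [List.filter_cons, List.filter_nil, h1]
      norm_num
      rw [sorted_append_singleton,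
        insertBy_append_none _ x _ _ (by
          intro b hb; have := memS 0 b hb; simp [h1, this]),
        insertBy_append_all _ x _ _ (by
          intro b hb; have := memS 2 b hb; simp [h1, this]),
        insertBy_congr _ (fun a b => decide (k2 a < k2 b)) x _ (by
          intro b hb; have := memS 1 b hb; simp [h1, this])]
    · simp only [List.filter_cons, List.filter_nil, h2]
      norm_num
      rw [sorted_append_singleton,
        insertBy_append_none _ x _ _ (by
          intro b hb; have := memS 0 b hb; simp [h2, this]),
        insertBy_append_none _ x _ _ (by
          intro b hb; have := memS 1 b hb; simp [h2, this]),
        insertBy_congr _ (fun a b => decide (k2 a < k2 b)) x _ (by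
          intro b hb; have := memS 2 b hb; simp [h2, this])]

theorem pvPrio_char (b : List (String × String)) :
    pvPrio b = (if (PySem.Dict.mk b).getD "nationality" "OTHER" == "JP" then (0:Int)
                else if (PySem.Dict.mk b).getD "nationality" "OTHER" == "KR" then 1 else 2) := by
  unfold pvPrio
  generalize (PySem.Dict.mk b).getD "nationality" "OTHER" = nat
  by_cases hJ : nat = "JP"
  · subst hJ; rfl
  · by_cases hK : nat = "KR"
    · subst hK; rfl
    · by_cases hO : nat = "OTHER"
      · subst hO; rfl
      · have hJ' : ("JP" == nat) = false := by simp [Ne.symm hJ]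
        have hK' : ("KR" == nat) = false := by simp [Ne.symm hK]
        have hO' : ("OTHER" == nat) = false := by simp [Ne.symm hO]
        have hJ2 : (nat == "JP") = false := by simp [hJ]
        have hK2 : (nat == "KR") = false := by simp [hK]
        simp [PySem.Dict.getD, hJ', hK', hO', hJ2, hK2, PySem.Dict.get?]

theorem pvPrio_cases (b : List (String × String)) : pvPrio b = 0 ∨ pvPrio b = 1 ∨ pvPrio b = 2 := by
  rw [pvPrio_char]; split_ifs <;> simp

-- the partition fold produces the three filters
theorem pvPartition_eq (books : List (List (String × String))) :
    pvPartition books =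
      (books.filter (fun b => (PySem.Dict.mk b).getD "nationality" "OTHER" == "JP"),
       books.filter (fun b => (PySem.Dict.mk b).getD "nationality" "OTHER" == "KR"),
       books.filter (fun b => !((PySem.Dict.mk b).getD "nationality" "OTHER" == "JP")
                             && !((PySem.Dict.mk b).getD "nationality" "OTHER" == "KR"))) := by
  have gen : ∀ (l : List (List (String × String)))
      (j k o : List (List (String × String))),
      l.foldl pvStep (j, k, o) =
      (j ++ l.filter (fun b => (PySem.Dict.mk b).getD "nationality" "OTHER" == "JP"),
       k ++ l.filter (fun b => (PySem.Dict.mk b).getD "nationality" "OTHER" == "KR"),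
       o ++ l.filter (fun b => !((PySem.Dict.mk b).getD "nationality" "OTHER" == "JP")
                             && !((PySem.Dict.mk b).getD "nationality" "OTHER" == "KR"))) := by
    intro l
    induction l with
    | nil => intro j k o; simp
    | cons b t ih =>
      intro j k o
      rw [List.foldl_cons]
      by_cases hJ : (PySem.Dict.mk b).getD "nationality" "OTHER" = "JP"
      · rw [show pvStep (j, k, o) b = (j ++ [b], k, o) from by simp [pvStep, hJ], ih]
        simp [hJ]
      · by_cases hK : (PySem.Dict.mk b).getD "nationality" "OTHER" = "KR"
        · rw [show pvStep (j, k, o) b = (j, k ++ [b], o) from by simp [pvStep, hK], ih]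
          simp [hK]
        · rw [show pvStep (j, k, o) b = (j, k, o ++ [b]) from by simp [pvStep, hJ, hK], ih]
          simp [hJ, hK]
  unfold pvPartition
  simpa using gen books [] [] []

-- ===== VERDICT (by name: the statement is the Claim_ definition above) =====
theorem sort_books_jp_first_spec : Claim_equal_sort_books_jp_first := by
  intro books _
  show sort_books_jp_first books = sort_books_jp_first_alt books
  unfold sort_books_jp_first sort_books_jp_first_alt
  rw [pvPartition_eq, sorted2_bucket pvPrio pvDateKey pvPrio_cases]
  have h0 : books.filter (fun x => pvPrio x == 0)
      = books.filter (fun b => (PySem.Dict.mk b).getD "nationality" "OTHER" == "JP") := by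
    apply List.filter_congr; intro b _; rw [pvPrio_char]; split_ifs <;> simp_all
  have h1 : books.filter (fun x => pvPrio x == 1)
      = books.filter (fun b => (PySem.Dict.mk b).getD "nationality" "OTHER" == "KR") := by
    apply List.filter_congr; intro b _; rw [pvPrio_char]; split_ifs <;> simp_all
  have h2 : books.filter (fun x => pvPrio x == 2)
      = books.filter (fun b => !((PySem.Dict.mk b).getD "nationality" "OTHER" == "JP")
                             && !((PySem.Dict.mk b).getD "nationality" "OTHER" == "KR")) := by
    apply List.filter_congr; intro b _; rw [pvPrio_char]; split_ifs <;> simp_all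
  rw [h0, h1, h2]
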